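-- pv_equiv track=rewrite | github.com/avatardebris-debug/throng5 | brain/planning/llm_strategy.py | parse_entity_names
-- ===== SOURCE A (Python) =====
-- from typing import Any, Dict, List, Optional
--
-- def parse_entity_names(response: str) -> List[Dict[str, str]]:
--     """Parse entity naming response."""
--     entities = []
--     current: Dict[str, str] = {}
--
--     for line in response.split("\n"):
--         line = line.strip()
--         if line.upper().startswith("NAME:"):
--             if current:
--                 entities.append(current)
--             current = {"name": line.split(":", 1)[1].strip()}
--         elif line.upper().startswith("TYPE:"):
--             current["type"] = line.split(":", 1)[1].strip().lower()
--         elif line.upper().startswith("NOTES:"):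
--             current["notes"] = line.split(":", 1)[1].strip()
--
--     if current:
--         entities.append(current)
--     return entities
-- ===== SOURCE B (Python) =====
-- from typing import Dict, List
--
--
-- def parse_entity_names(response: str) -> List[Dict[str, str]]:
--     """Parse entity naming response (block-partition strategy)."""
--     lines = [line.strip() for line in response.split("\n")]
--     # Partition lines into blocks: a leading block, then one block per NAME: line.
--     blocks: List[List[str]] = [[]]
--     for line in lines:
--         if line.upper().startswith("NAME:"):
--             blocks.append([line])
--         else:
--             blocks[-1].append(line)
--     entities = []
--     for block in blocks:
--         if block and block[0].upper().startswith("NAME:"):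
--             d = {"name": block[0].split(":", 1)[1].strip()}
--             rest = block[1:]
--         else:
--             d = {}
--             rest = block
--         for line in rest:
--             if line.upper().startswith("TYPE:"):
--                 d["type"] = line.split(":", 1)[1].strip().lower()
--             elif line.upper().startswith("NOTES:"):
--                 d["notes"] = line.split(":", 1)[1].strip()
--         if d:
--             entities.append(d)
--     return entities
-- ===== Notes on version B (the rewrite author's own statement) =====
-- stated objective: alternative
-- what changed: A builds entities in one pass with a flush-as-you-go current-dict accumulator; B first partitions the stripped lines into a leading block plus NAME:-headed blocks, then parses each block independently (name from the block head, TYPE/NOTES from the rest) and keeps the non-empty dicts.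
import Mathlib
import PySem

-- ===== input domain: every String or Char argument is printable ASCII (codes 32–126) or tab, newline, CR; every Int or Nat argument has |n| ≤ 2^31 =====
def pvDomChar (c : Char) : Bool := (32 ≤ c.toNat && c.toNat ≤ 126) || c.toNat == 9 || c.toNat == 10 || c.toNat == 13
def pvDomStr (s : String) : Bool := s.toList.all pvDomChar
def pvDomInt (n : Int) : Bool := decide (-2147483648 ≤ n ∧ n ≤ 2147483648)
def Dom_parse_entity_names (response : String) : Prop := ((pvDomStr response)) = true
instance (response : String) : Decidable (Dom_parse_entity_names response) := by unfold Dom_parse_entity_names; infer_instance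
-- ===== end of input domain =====

-- B replaces A's flush-as-you-go accumulator with a two-pass decomposition (partition lines
-- into NAME-headed blocks, then parse each block); same cost, alternative structure.

-- shared helper: line.split(":", 1)[1].strip()  (both Pythons contain this exact expression;
-- it is only evaluated on lines that start with "NAME:"/"TYPE:"/"NOTES:", which guarantee a colon)
def pvAfterColon (line : String) : String :=
  PySem.Str.strip (((PySem.Str.splitMax? line ":" 1).getD []).getD 1 "")

-- ===== PORT A =====
def pvStepA (st : List (List (String × String)) × PySem.Dict String String) (raw : String) :
    List (List (String × String)) × PySem.Dict String String :=
  let line := PySem.Str.strip raw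
  if PySem.Str.startswith (PySem.Str.upper line) "NAME:" then
    ((if st.2.items = [] then st.1 else st.1 ++ [st.2.items]),
      PySem.Dict.insert PySem.Dict.empty "name" (pvAfterColon line))
  else if PySem.Str.startswith (PySem.Str.upper line) "TYPE:" then
    (st.1, st.2.insert "type" (PySem.Str.lower (pvAfterColon line)))
  else if PySem.Str.startswith (PySem.Str.upper line) "NOTES:" then
    (st.1, st.2.insert "notes" (pvAfterColon line))
  else st

def parse_entity_names (response : String) : List (List (String × String)) :=
  let st := ((PySem.Str.split? response "\n").getD []).foldl pvStepA ([], PySem.Dict.empty)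
  if st.2.items = [] then st.1 else st.1 ++ [st.2.items]

-- ===== PORT B =====
def pvIsName (line : String) : Bool :=
  PySem.Str.startswith (PySem.Str.upper line) "NAME:"

-- blocks kept as (finished blocks, block under construction); Python's blocks list is p.1 ++ [p.2]
def pvBlockStep (p : List (List String) × List String) (line : String) :
    List (List String) × List String :=
  if pvIsName line then (p.1 ++ [p.2], [line]) else (p.1, p.2 ++ [line])

def pvField (d : PySem.Dict String String) (line : String) : PySem.Dict String String :=
  if PySem.Str.startswith (PySem.Str.upper line) "TYPE:" then
    d.insert "type" (PySem.Str.lower (pvAfterColon line))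
  else if PySem.Str.startswith (PySem.Str.upper line) "NOTES:" then
    d.insert "notes" (pvAfterColon line)
  else d

def pvParseBlock (b : List String) : PySem.Dict String String :=
  match b with
  | [] => PySem.Dict.empty
  | l :: ls =>
    if pvIsName l then
      ls.foldl pvField (PySem.Dict.insert PySem.Dict.empty "name" (pvAfterColon l))
    else (l :: ls).foldl pvField PySem.Dict.empty

def pvEmit (es : List (List (String × String))) (b : List String) :
    List (List (String × String)) :=
  let d := pvParseBlock b
  if d.items = [] then es else es ++ [d.items]

def parse_entity_names_alt (response : String) : List (List (String × String)) :=
  let lines := ((PySem.Str.split? response "\n").getD []).map PySem.Str.strip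
  let p := lines.foldl pvBlockStep ([], [])
  (p.1 ++ [p.2]).foldl pvEmit []

-- ===== PRECONDITION & SPEC =====
def Spec_parse_entity_names (response : String) (out : List (List (String × String))) : Prop := out = parse_entity_names_alt response
instance (response : String) (out : List (List (String × String))) : Decidable (Spec_parse_entity_names response out) := by unfold Spec_parse_entity_names; infer_instance

-- ===== CLAIM (what is proved, stated in full; the proofs are below) =====
def Claim_equal_parse_entity_names : Prop := ∀ (response : String), Dom_parse_entity_names response → Spec_parse_entity_names response (parse_entity_names response)

-- ===== LEMMAS AND PROOFS =====

-- reference recursion: process already-stripped lines with the current dict as accumulator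
def pvR (cur : PySem.Dict String String) : List String → List (List (String × String))
  | [] => if cur.items = [] then [] else [cur.items]
  | l :: ls =>
    if pvIsName l then
      (if cur.items = [] then [] else [cur.items]) ++
        pvR (PySem.Dict.insert PySem.Dict.empty "name" (pvAfterColon l)) ls
    else pvR (pvField cur l) ls

theorem pvA_eq_R (raws : List String) (es : List (List (String × String)))
    (cur : PySem.Dict String String) :
    (let st := raws.foldl pvStepA (es, cur);
      if st.2.items = [] then st.1 else st.1 ++ [st.2.items])
    = es ++ pvR cur (raws.map PySem.Str.strip) := by
  induction raws generalizing es cur with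
  | nil => simp [pvR]; split <;> simp
  | cons raw rest ih =>
    simp only [List.foldl_cons, List.map_cons, pvStepA]
    by_cases h1 : PySem.Str.startswith (PySem.Str.upper (PySem.Str.strip raw)) "NAME:"
    · simp only [if_pos h1, ih, pvR, pvIsName, if_pos h1]
      split <;> simp_all
    · simp only [if_neg h1]
      by_cases h2 : PySem.Str.startswith (PySem.Str.upper (PySem.Str.strip raw)) "TYPE:"
      · simp only [if_pos h2, ih, pvR, pvIsName, if_neg h1, pvField, if_pos h2]
      · simp only [if_neg h2]
        by_cases h3 : PySem.Str.startswith (PySem.Str.upper (PySem.Str.strip raw)) "NOTES:"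
        · simp only [if_pos h3, ih, pvR, pvIsName, if_neg h1, pvField, if_neg h2, if_pos h3]
        · simp only [if_neg h3, ih, pvR, pvIsName, if_neg h1, pvField, if_neg h2, if_neg h3]

theorem pvEmit_append (done : List (List String)) (b : List String) :
    (done ++ [b]).foldl pvEmit []
    = done.foldl pvEmit [] ++
        (if (pvParseBlock b).items = [] then [] else [(pvParseBlock b).items]) := by
  rw [List.foldl_append]
  simp only [List.foldl_cons, List.foldl_nil, pvEmit]
  split <;> simp

theorem pvParseBlock_append (b : List String) (l : String) (h : ¬ pvIsName l = true) :
    pvParseBlock (b ++ [l]) = pvField (pvParseBlock b) l := by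
  cases b with
  | nil => simp [pvParseBlock, h]
  | cons x xs =>
    by_cases hx : pvIsName x
    · simp [pvParseBlock, hx, List.foldl_append]
    · simp [pvParseBlock, hx, List.foldl_append]

theorem pvB_eq_R (lines : List String) (done : List (List String)) (cur : List String) :
    (let p := lines.foldl pvBlockStep (done, cur);
      (p.1 ++ [p.2]).foldl pvEmit [])
    = done.foldl pvEmit [] ++ pvR (pvParseBlock cur) lines := by
  induction lines generalizing done cur with
  | nil => simpa [pvR] using pvEmit_append done cur
  | cons l ls ih =>
    simp only [List.foldl_cons]
    by_cases h : pvIsName l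
    · simp only [pvBlockStep, if_pos h]
      rw [ih]
      rw [pvEmit_append]
      simp only [pvR, if_pos h, List.append_assoc]
      congr 1
      congr 1
      simp [pvParseBlock, h]
    · simp only [pvBlockStep, if_neg h]
      rw [ih, pvParseBlock_append _ _ h]
      simp [pvR, h]

-- ===== VERDICT (by name: the statement is the Claim_ definition above) =====
theorem parse_entity_names_spec : Claim_equal_parse_entity_names := by
  intro response _
  unfold Spec_parse_entity_names parse_entity_names parse_entity_names_alt
  rw [pvA_eq_R, pvB_eq_R]
  simp [pvParseBlock]
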